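-- pv_equiv track=rewrite | github.com/anonym-scientist/cut-qaoa-paper | circuit_cutting/postprocess.py | _get_width_marginals_and_fixed_bits
-- ===== SOURCE A (Python) =====
-- def _get_width_marginals_and_fixed_bits(info, marginal_indices, fixed_bits):
--     fragment_widths = [fragment_info["width"] for fragment_info in info.values()]
--     fragment_widths_rev = list(reversed(fragment_widths))
--     fragment_widths_sum = [0]
--     for i in range(1, len(fragment_widths_rev)):
--         fragment_widths_sum.append(fragment_widths_sum[i - 1] + fragment_widths_rev[i])
--
--     fragment_fixed_bits = [{} for _ in range(len(fragment_widths))]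
--     if fixed_bits is not None:
--         sorted_fixed_bits = sorted(fixed_bits.items())
--         f_idx = 0
--         for idx, bit in sorted_fixed_bits:
--             while f_idx < len(fragment_widths_sum) - 1 and idx >= fragment_widths_sum[f_idx + 1]:
--                 f_idx += 1
--             fragment_bit_index = fragment_widths_rev[f_idx] - (idx - fragment_widths_sum[f_idx]) - 1
--             fragment_fixed_bits[len(fragment_widths_sum) - f_idx - 1][fragment_bit_index] = bit
--
--     if marginal_indices is None:
--         width = sum(fragment_widths)
--         fragment_marginal_indices = [None for _ in range(len(fragment_widths))]
--         return width, fragment_widths, fragment_marginal_indices, fragment_fixed_bits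
--     else:
--         fragment_marginal_indices = [[] for _ in range(len(fragment_widths))]
--         marginal_indices.sort()
--         f_idx = 0
--         for idx in marginal_indices:
--             while f_idx < len(fragment_widths_sum) - 1 and idx >= fragment_widths_sum[f_idx + 1]:
--                 f_idx += 1
--             fragment_marginal_index = fragment_widths_rev[f_idx] - (idx - fragment_widths_sum[f_idx]) - 1
--             fragment_marginal_indices[len(fragment_widths_sum) - f_idx - 1].append(fragment_marginal_index)
--
--         marginal_fragment_widths = [len(m_i) for m_i in fragment_marginal_indices]
--         width = sum(marginal_fragment_widths)
--         return width, marginal_fragment_widths, fragment_marginal_indices, fragment_fixed_bits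
-- ===== SOURCE B (Python) =====
-- def _locate(sums, idx):
--     # number of interior boundaries at or below idx = fragment slot of idx
--     f = 0
--     for s in sums[1:]:
--         if s <= idx:
--             f += 1
--     return f
--
--
-- def _get_width_marginals_and_fixed_bits(info, marginal_indices, fixed_bits):
--     widths = [fragment_info["width"] for fragment_info in info.values()]
--     rev = widths[::-1]
--     sums = [0]
--     for w in rev[1:]:
--         sums.append(sums[-1] + w)
--     n = len(widths)
--
--     if fixed_bits is None:
--         fragment_fixed_bits = [{} for _ in range(n)]
--     else:
--         items = sorted(fixed_bits.items())
--         fragment_fixed_bits = [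
--             {rev[f] - (idx - sums[f]) - 1: bit
--              for idx, bit in items if _locate(sums, idx) == f}
--             for f in (len(sums) - 1 - k for k in range(n))]
--
--     if marginal_indices is None:
--         return sum(widths), widths, [None] * n, fragment_fixed_bits
--
--     marginal_indices.sort()
--     fragment_marginal_indices = [
--         [rev[f] - (idx - sums[f]) - 1
--          for idx in marginal_indices if _locate(sums, idx) == f]
--         for f in (len(sums) - 1 - k for k in range(n))]
--     mw = [len(m) for m in fragment_marginal_indices]
--     return sum(mw), mw, fragment_marginal_indices, fragment_fixed_bits
-- ===== Notes on version B (the rewrite author's own statement) =====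
-- stated objective: alternative
-- what changed: The stateful two-pointer sweep that routes sorted global indices into per-fragment buckets is replaced by a loop inversion: for each fragment, B filters the sorted indices by a stateless locate (count of boundary prefix-sums <= idx) and maps the local-index formula, building each fragment's list/dict independently.
import Mathlib
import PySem

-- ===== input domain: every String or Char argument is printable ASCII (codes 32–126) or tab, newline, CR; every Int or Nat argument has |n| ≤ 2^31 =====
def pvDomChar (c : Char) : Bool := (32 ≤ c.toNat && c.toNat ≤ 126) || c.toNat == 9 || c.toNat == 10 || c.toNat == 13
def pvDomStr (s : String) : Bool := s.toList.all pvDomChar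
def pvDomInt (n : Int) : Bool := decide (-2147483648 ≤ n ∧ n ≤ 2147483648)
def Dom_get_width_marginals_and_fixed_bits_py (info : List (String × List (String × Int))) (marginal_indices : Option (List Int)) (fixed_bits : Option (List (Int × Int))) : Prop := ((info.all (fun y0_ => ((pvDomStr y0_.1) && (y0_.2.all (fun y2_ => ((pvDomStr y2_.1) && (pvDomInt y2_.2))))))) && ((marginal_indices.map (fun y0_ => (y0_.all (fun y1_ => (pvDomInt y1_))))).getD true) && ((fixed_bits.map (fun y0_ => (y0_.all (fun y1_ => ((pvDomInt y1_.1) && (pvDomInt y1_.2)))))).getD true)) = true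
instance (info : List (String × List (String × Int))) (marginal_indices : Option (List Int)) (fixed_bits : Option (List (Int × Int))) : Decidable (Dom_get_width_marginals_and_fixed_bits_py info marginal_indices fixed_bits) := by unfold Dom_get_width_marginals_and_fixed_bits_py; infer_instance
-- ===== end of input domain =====

-- B replaces A's stateful two-pointer sweep over the sorted global indices by a loop inversion
-- (per fragment: a stateless boundary-count locate + filter/map); equivalence is about the RETURN
-- value only — Python A (and B) sort marginal_indices in place, a side effect not modelled here.

-- ===== PORT A =====
-- while f_idx < len(fragment_widths_sum) - 1 and idx >= fragment_widths_sum[f_idx + 1]: f_idx += 1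
def pvAdvance (sums : List Int) (f : Nat) (idx : Int) : Nat :=
  if h : f < sums.length - 1 ∧ PySem.List.pyGetD sums ((f : Int) + 1) 0 ≤ idx then
    pvAdvance sums (f + 1) idx
  else f
termination_by sums.length - f
decreasing_by omega

def get_width_marginals_and_fixed_bits_py (info : List (String × List (String × Int))) (marginal_indices : Option (List Int)) (fixed_bits : Option (List (Int × Int))) : Int × List Int × List (Option (List Int)) × (List (List (Int × Int))) :=
  let fragment_widths : List Int := info.map (fun p => (PySem.Dict.mk p.2).getD "width" 0)
  let fragment_widths_rev : List Int := fragment_widths.reverse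
  let fragment_widths_sum : List Int :=
    (PySem.List.pyRange 1 (fragment_widths_rev.length : Int)).foldl
      (fun s i => s ++ [PySem.List.pyGetD s (i - 1) 0 + PySem.List.pyGetD fragment_widths_rev i 0]) [0]
  let fragment_fixed_bits : List (PySem.Dict Int Int) :=
    match fixed_bits with
    | none => List.replicate fragment_widths.length PySem.Dict.empty
    | some fbl =>
      ((PySem.List.sorted2 fbl (·.1) (·.2)).foldl
        (fun st pr =>
          (pvAdvance fragment_widths_sum st.1 pr.1,
           st.2.set (fragment_widths_sum.length - 1 - pvAdvance fragment_widths_sum st.1 pr.1)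
             ((st.2.getD (fragment_widths_sum.length - 1 - pvAdvance fragment_widths_sum st.1 pr.1) PySem.Dict.empty).insert
               (PySem.List.pyGetD fragment_widths_rev ((pvAdvance fragment_widths_sum st.1 pr.1 : Nat) : Int) 0
                 - (pr.1 - PySem.List.pyGetD fragment_widths_sum ((pvAdvance fragment_widths_sum st.1 pr.1 : Nat) : Int) 0) - 1)
               pr.2)))
        (0, List.replicate fragment_widths.length PySem.Dict.empty)).2
  match marginal_indices with
  | none =>
      (fragment_widths.sum, fragment_widths,
       List.replicate fragment_widths.length none,
       fragment_fixed_bits.map (fun d => d.items))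
  | some mi =>
      let fmi : List (List Int) :=
        ((PySem.List.sorted mi (fun x => x)).foldl
          (fun st idx =>
            (pvAdvance fragment_widths_sum st.1 idx,
             st.2.set (fragment_widths_sum.length - 1 - pvAdvance fragment_widths_sum st.1 idx)
               (st.2.getD (fragment_widths_sum.length - 1 - pvAdvance fragment_widths_sum st.1 idx) []
                 ++ [PySem.List.pyGetD fragment_widths_rev ((pvAdvance fragment_widths_sum st.1 idx : Nat) : Int) 0
                      - (idx - PySem.List.pyGetD fragment_widths_sum ((pvAdvance fragment_widths_sum st.1 idx : Nat) : Int) 0) - 1])))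
          (0, List.replicate fragment_widths.length ([] : List Int))).2
      let mw : List Int := fmi.map (fun m => (m.length : Int))
      (mw.sum, mw, fmi.map some, fragment_fixed_bits.map (fun d => d.items))

-- ===== PORT B =====
-- f = 0; for s in sums[1:]:  if s <= idx: f += 1   (stateless bucket lookup)
def pvLocate (sums : List Int) (idx : Int) : Nat :=
  (sums.drop 1).foldl (fun f s => if s ≤ idx then f + 1 else f) 0

def get_width_marginals_and_fixed_bits_py_alt (info : List (String × List (String × Int))) (marginal_indices : Option (List Int)) (fixed_bits : Option (List (Int × Int))) : Int × List Int × List (Option (List Int)) × (List (List (Int × Int))) :=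
  let widths : List Int := info.map (fun p => (PySem.Dict.mk p.2).getD "width" 0)
  let rev : List Int := widths.reverse
  let sums : List Int := (rev.drop 1).foldl (fun s w => s ++ [PySem.List.pyGetD s (-1) 0 + w]) [0]
  let n : Nat := widths.length
  let ffb : List (PySem.Dict Int Int) :=
    match fixed_bits with
    | none => List.replicate n PySem.Dict.empty
    | some fbl =>
      (List.range n).map (fun k =>
        ((PySem.List.sorted2 fbl (·.1) (·.2)).filter (fun pr => pvLocate sums pr.1 == sums.length - 1 - k)).foldl
          (fun d pr => d.insert (rev.getD (sums.length - 1 - k) 0 - (pr.1 - sums.getD (sums.length - 1 - k) 0) - 1) pr.2)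
          PySem.Dict.empty)
  match marginal_indices with
  | none => (widths.sum, widths, List.replicate n none, ffb.map (fun d => d.items))
  | some mil =>
      let smi : List Int := PySem.List.sorted mil (fun x => x)
      let fmi : List (List Int) :=
        (List.range n).map (fun k =>
          (smi.filter (fun idx => pvLocate sums idx == sums.length - 1 - k)).map
            (fun idx => rev.getD (sums.length - 1 - k) 0 - (idx - sums.getD (sums.length - 1 - k) 0) - 1))
      let mw : List Int := fmi.map (fun m => (m.length : Int))
      (mw.sum, mw, fmi.map some, ffb.map (fun d => d.items))

-- ===== PRECONDITION & SPEC =====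
-- Pre_ excludes (1) fragments without a "width" key and empty info with non-empty index lists, where
-- Python A raises (KeyError / IndexError), and (2) negative "width" values — outside the natural
-- domain of register widths — where the non-monotone boundary table makes A's sweep result an
-- artefact of its two-pointer implementation.
def Pre_get_width_marginals_and_fixed_bits_py (info : List (String × List (String × Int))) (marginal_indices : Option (List Int)) (fixed_bits : Option (List (Int × Int))) : Prop :=
  (info.all (fun p => (((PySem.Dict.mk p.2).get? "width").map (fun w => decide (0 ≤ w))).getD false) = true) ∧
  (info = [] → marginal_indices.getD [] = [] ∧ fixed_bits.getD [] = [])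
instance (info : List (String × List (String × Int))) (marginal_indices : Option (List Int)) (fixed_bits : Option (List (Int × Int))) : Decidable (Pre_get_width_marginals_and_fixed_bits_py info marginal_indices fixed_bits) := by unfold Pre_get_width_marginals_and_fixed_bits_py; infer_instance

def pvWitness_get_width_marginals_and_fixed_bits_py : (List (String × List (String × Int))) × Option (List Int) × (Option (List (Int × Int))) :=
  ([("a", [("width", 2)]), ("b", [("width", 1)])], some [0, 2], some [(1, 7)])

def Spec_get_width_marginals_and_fixed_bits_py (info : List (String × List (String × Int))) (marginal_indices : Option (List Int)) (fixed_bits : Option (List (Int × Int))) (out : Int × List Int × List (Option (List Int)) × (List (List (Int × Int)))) : Prop := out = get_width_marginals_and_fixed_bits_py_alt info marginal_indices fixed_bits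
instance (info : List (String × List (String × Int))) (marginal_indices : Option (List Int)) (fixed_bits : Option (List (Int × Int))) (out : Int × List Int × List (Option (List Int)) × (List (List (Int × Int)))) : Decidable (Spec_get_width_marginals_and_fixed_bits_py info marginal_indices fixed_bits out) := by unfold Spec_get_width_marginals_and_fixed_bits_py; infer_instance

-- ===== CLAIM (what is proved, stated in full; the proofs are below) =====
def Claim_equal_get_width_marginals_and_fixed_bits_py : Prop := ∀ (info : List (String × List (String × Int))) (marginal_indices : Option (List Int)) (fixed_bits : Option (List (Int × Int))), Dom_get_width_marginals_and_fixed_bits_py info marginal_indices fixed_bits → Pre_get_width_marginals_and_fixed_bits_py info marginal_indices fixed_bits → Spec_get_width_marginals_and_fixed_bits_py info marginal_indices fixed_bits (get_width_marginals_and_fixed_bits_py info marginal_indices fixed_bits)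

-- ===== LEMMAS AND PROOFS =====
-- canonical prefix-sum table: pvSums a t = [a, a+t0, a+t0+t1, ...]
def pvSums : Int → List Int → List Int
  | a, [] => [a]
  | a, w :: t => a :: pvSums (a + w) t

theorem pvSums_length (a : Int) (t : List Int) : (pvSums a t).length = t.length + 1 := by
  induction t generalizing a with
  | nil => simp [pvSums]
  | cons w t ih => simp [pvSums, ih]
theorem pvSums_getElem (a : Int) (t : List Int) (j : Nat) (h : j < t.length + 1) :
    (pvSums a t)[j]'(by rw [pvSums_length]; omega) = a + (t.take j).sum := by
  induction t generalizing a j with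
  | nil =>
    have hj : j = 0 := by simp at h; omega
    subst hj; simp [pvSums]
  | cons w t ih =>
    cases j with
    | zero => simp [pvSums]
    | succ j =>
      have := ih (a + w) j (by simpa using Nat.lt_of_succ_lt_succ h)
      simp [pvSums, this]; ring
theorem pvSums_append (a : Int) (t : List Int) (w : Int) :
    pvSums a (t ++ [w]) = pvSums a t ++ [a + t.sum + w] := by
  induction t generalizing a with
  | nil => simp [pvSums]
  | cons v t ih => simp [pvSums, ih]; ring
theorem pvSums_le_mem (a : Int) (t : List Int) (h : ∀ w ∈ t, 0 ≤ w) :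
    ∀ x ∈ pvSums a t, a ≤ x := by
  induction t generalizing a with
  | nil => simp [pvSums]
  | cons w t ih =>
    intro x hx
    simp only [pvSums, List.mem_cons] at hx
    rcases hx with rfl | hx
    · exact le_refl _
    · have h0 : 0 ≤ w := h w (by simp)
      have := ih (a + w) (fun v hv => h v (by simp [hv])) x hx
      omega
theorem pvSums_pairwise (a : Int) (t : List Int) (h : ∀ w ∈ t, 0 ≤ w) :
    (pvSums a t).Pairwise (· ≤ ·) := by
  induction t generalizing a with
  | nil => simp [pvSums]
  | cons w t ih =>
    simp only [pvSums]
    refine List.pairwise_cons.mpr ⟨?_, ih (a + w) (fun v hv => h v (by simp [hv]))⟩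
    intro x hx
    have h0 : 0 ≤ w := h w (by simp)
    have := pvSums_le_mem (a + w) t (fun v hv => h v (by simp [hv])) x hx
    omega
theorem sumsB_aux (t : List Int) : ∀ (s0 : List Int) (h : s0 ≠ []),
    t.foldl (fun s w => s ++ [PySem.List.pyGetD s (-1) 0 + w]) s0 = s0.dropLast ++ pvSums (s0.getLast h) t := by
  induction t with
  | nil =>
    intro s0 h
    simp only [List.foldl_nil, pvSums]
    exact (List.dropLast_append_getLast h).symm
  | cons w t ih =>
    intro s0 h
    simp only [List.foldl_cons]
    rw [PySem.List.pyGetD_neg_one s0 0 h]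
    rw [ih (s0 ++ [s0.getLast h + w]) (by simp)]
    simp only [List.dropLast_concat, List.getLast_concat, pvSums]
    rw [← List.singleton_append, ← List.append_assoc, List.dropLast_append_getLast]
theorem sumsB_eq (t : List Int) :
    t.foldl (fun s w => s ++ [PySem.List.pyGetD s (-1) 0 + w]) [0] = pvSums 0 t := by
  rw [sumsB_aux t [0] (by simp)]; simp

theorem sumsA_aux (u : List Int) (r : Int) : ∀ (m : Nat), m ≤ u.length →
    (PySem.List.pyRange 1 ((m : Int) + 1)).foldl
      (fun s i => s ++ [PySem.List.pyGetD s (i - 1) 0 + PySem.List.pyGetD (r :: u) i 0]) [0]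
    = pvSums 0 (u.take m) := by
  intro m
  induction m with
  | zero =>
    intro _
    rw [PySem.List.pyRange_one_eq_nil (by norm_num)]
    simp [pvSums]
  | succ m ih =>
    intro hm
    have hm' : m ≤ u.length := by omega
    have hcast : ((m + 1 : Nat) : Int) + 1 = ((m : Int) + 1) + 1 := by push_cast; ring
    rw [hcast, PySem.List.pyRange_one_succ_right (by omega), List.foldl_append]
    rw [ih hm']
    simp only [List.foldl_cons, List.foldl_nil]
    have hlen : (pvSums 0 (u.take m)).length = m + 1 := by
      rw [pvSums_length, List.length_take]; omega
    have h1 : PySem.List.pyGetD (pvSums 0 (u.take m)) ((m : Int) + 1 - 1) 0 = (u.take m).sum := by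
      have : (m : Int) + 1 - 1 = ((m : Nat) : Int) := by ring
      rw [this, PySem.List.pyGetD_natCast]
      rw [List.getD_eq_getElem?_getD, List.getElem?_eq_getElem (by omega)]
      have := pvSums_getElem 0 (u.take m) m (by rw [List.length_take]; omega)
      simp only [this]
      simp [List.take_take]
    have h2 : PySem.List.pyGetD (r :: u) ((m : Int) + 1) 0 = u[m]'(by omega) := by
      have : (m : Int) + 1 = ((m + 1 : Nat) : Int) := by push_cast; ring
      rw [this, PySem.List.pyGetD_natCast]
      rw [List.getD_eq_getElem?_getD, List.getElem?_eq_getElem (by simp; omega)]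
      simp
    rw [h1, h2]
    have : u.take (m + 1) = u.take m ++ [u[m]'(by omega)] := by
      rw [List.take_add_one, List.getElem?_eq_getElem (by omega)]
      simp
    rw [this, pvSums_append]
    simp
theorem sumsA_eq (rev : List Int) :
    (PySem.List.pyRange 1 (rev.length : Int)).foldl
      (fun s i => s ++ [PySem.List.pyGetD s (i - 1) 0 + PySem.List.pyGetD rev i 0]) [0]
    = pvSums 0 (rev.drop 1) := by
  cases rev with
  | nil =>
    rw [PySem.List.pyRange_one_eq_nil (by norm_num)]
    simp [pvSums]
  | cons r u =>
    have hc : ((r :: u).length : Int) = ((u.length : Nat) : Int) + 1 := by simp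
    rw [hc, sumsA_aux u r u.length (le_refl _)]
    simp

theorem sortedCount_lt (t : List Int) (ht : t.Pairwise (· ≤ ·)) (idx : Int) (i : Nat)
    (h : i < t.countP (fun s => decide (s ≤ idx))) :
    t[i]'(lt_of_lt_of_le h List.countP_le_length) ≤ idx := by
  induction t generalizing i with
  | nil => simp at h
  | cons s t ih =>
    have hht := (List.pairwise_cons.mp ht)
    by_cases hs : s ≤ idx
    · cases i with
      | zero => simpa using hs
      | succ i =>
        have : i < t.countP (fun s => decide (s ≤ idx)) := by
          rw [List.countP_cons] at h; simp [hs] at h; omega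
        simpa using ih hht.2 i this
    · have hz : t.countP (fun s => decide (s ≤ idx)) = 0 := by
        rw [List.countP_eq_zero]
        intro x hx
        simp only [decide_eq_true_eq]
        intro hle
        exact hs (le_trans (hht.1 x hx) hle)
      rw [List.countP_cons] at h
      simp [hs, hz] at h
theorem sortedCount_ge (t : List Int) (ht : t.Pairwise (· ≤ ·)) (idx : Int)
    (h : t.countP (fun s => decide (s ≤ idx)) < t.length) :
    idx < t[t.countP (fun s => decide (s ≤ idx))] := by
  induction t with
  | nil => simp at h
  | cons s t ih =>
    have hht := (List.pairwise_cons.mp ht)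
    by_cases hs : s ≤ idx
    · have hc : (s :: t).countP (fun s => decide (s ≤ idx)) = t.countP (fun s => decide (s ≤ idx)) + 1 := by
        rw [List.countP_cons]; simp [hs]
      simp only [hc] at h ⊢
      have := ih hht.2 (by simpa using Nat.lt_of_succ_lt_succ h)
      simpa using this
    · have hz : t.countP (fun s => decide (s ≤ idx)) = 0 := by
        rw [List.countP_eq_zero]
        intro x hx
        simp only [decide_eq_true_eq]
        intro hle
        exact hs (le_trans (hht.1 x hx) hle)
      have hc : (s :: t).countP (fun s => decide (s ≤ idx)) = 0 := by
        rw [List.countP_cons]; simp [hs, hz]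
      simp only [hc]
      simpa using lt_of_not_ge hs
theorem pvLocate_aux (idx : Int) (t : List Int) : ∀ (a : Nat),
    t.foldl (fun f s => if s ≤ idx then f + 1 else f) a = a + t.countP (fun s => decide (s ≤ idx)) := by
  induction t with
  | nil => simp
  | cons s t ih =>
    intro a
    simp only [List.foldl_cons, List.countP_cons]
    by_cases hs : s ≤ idx
    · rw [if_pos hs, ih]; simp [hs]; omega
    · rw [if_neg hs, ih]; simp [hs]
theorem pvLocate_eq_countP (sums : List Int) (idx : Int) :
    pvLocate sums idx = (sums.drop 1).countP (fun s => decide (s ≤ idx)) := by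
  unfold pvLocate
  rw [pvLocate_aux]
  omega

theorem pvAdvance_eq_aux (sums : List Int) (idx : Int) (L : Nat)
    (hLlen : L ≤ (sums.drop 1).length)
    (hbelow : ∀ i (h : i < L), (sums.drop 1)[i]'(lt_of_lt_of_le h hLlen) ≤ idx)
    (habove : ∀ h : L < (sums.drop 1).length, idx < (sums.drop 1)[L]) :
    ∀ (d f : Nat), f ≤ L → L - f = d → pvAdvance sums f idx = L := by
  have hlen : (sums.drop 1).length = sums.length - 1 := by simp
  have heq : ∀ (f : Nat) (h : f < (sums.drop 1).length),
      PySem.List.pyGetD sums ((f : Int) + 1) 0 = (sums.drop 1)[f]'h := by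
    intro f h
    have hc : ((f : Int) + 1) = ((f + 1 : Nat) : Int) := by push_cast; ring
    rw [hc, PySem.List.pyGetD_natCast]
    rw [List.getD_eq_getElem?_getD, List.getElem?_eq_getElem (by omega)]
    simp
  intro d
  induction d with
  | zero =>
    intro f hf hd
    have hfL : f = L := by omega
    subst hfL
    rw [pvAdvance, dif_neg]
    rintro ⟨h1, h2⟩
    have hlt : f < (sums.drop 1).length := by omega
    rw [heq f hlt] at h2
    have := habove hlt
    omega
  | succ d ih =>
    intro f hf hd
    have hflt : f < L := by omega
    have hlt : f < (sums.drop 1).length := by omega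
    rw [pvAdvance, dif_pos ⟨by omega, by rw [heq f hlt]; exact hbelow f hflt⟩]
    exact ih (f + 1) (by omega) (by omega)

theorem pvAdvance_eq (sums : List Int) (hs : (sums.drop 1).Pairwise (· ≤ ·)) (idx : Int)
    (f : Nat) (hf : f ≤ (sums.drop 1).countP (fun s => decide (s ≤ idx))) :
    pvAdvance sums f idx = (sums.drop 1).countP (fun s => decide (s ≤ idx)) := by
  exact pvAdvance_eq_aux sums idx _ List.countP_le_length
    (fun i h => sortedCount_lt (sums.drop 1) hs idx i h)
    (fun h => sortedCount_ge (sums.drop 1) hs idx h)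
    _ f hf rfl

theorem sweep_eq {α σ : Type} (sums : List Int) (L : Int → Nat)
    (hadv : ∀ (f : Nat) (i : Int), f ≤ L i → pvAdvance sums f i = L i)
    (hmono : ∀ i j : Int, i ≤ j → L i ≤ L j)
    (key : α → Int) (u : σ → Nat → α → σ) :
    ∀ (xs : List α), xs.Pairwise (fun a b => key a ≤ key b) →
      ∀ (f0 : Nat), (∀ x ∈ xs, f0 ≤ L (key x)) → ∀ (s0 : σ),
      (xs.foldl (fun st x => (pvAdvance sums st.1 (key x), u st.2 (pvAdvance sums st.1 (key x)) x)) (f0, s0)).2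
        = xs.foldl (fun s x => u s (L (key x)) x) s0 := by
  intro xs
  induction xs with
  | nil => intro _ _ _ _; rfl
  | cons x t ih =>
    intro hp f0 hf0 s0
    have hx : pvAdvance sums f0 (key x) = L (key x) := hadv f0 (key x) (hf0 x (by simp))
    simp only [List.foldl_cons, hx]
    exact ih (List.pairwise_cons.mp hp).2 (L (key x))
      (fun y hy => hmono (key x) (key y) ((List.pairwise_cons.mp hp).1 y hy)) _

theorem bucket_eq {α β : Type} (pos : α → Nat) (g : β → α → β) (e : β) :
    ∀ (xs : List α) (acc : List β), (∀ x ∈ xs, pos x < acc.length) →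
      xs.foldl (fun s x => s.set (pos x) (g (s.getD (pos x) e) x)) acc
        = (List.range acc.length).map (fun j => (xs.filter (fun x => pos x == j)).foldl g (acc.getD j e)) := by
  intro xs
  induction xs with
  | nil =>
    intro acc _
    simp only [List.foldl_nil, List.filter_nil]
    apply List.ext_getElem
    · simp
    · intro i h1 h2
      simp only [List.getElem_map, List.getElem_range]
      rw [List.getD_eq_getElem?_getD, List.getElem?_eq_getElem h1]
      simp
  | cons x t ih =>
    intro acc hpos
    have hx : pos x < acc.length := hpos x (by simp)
    simp only [List.foldl_cons]
    rw [ih (acc.set (pos x) (g (acc.getD (pos x) e) x))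
        (fun y hy => by rw [List.length_set]; exact hpos y (by simp [hy]))]
    rw [List.length_set]
    apply List.map_congr_left
    intro j hj
    rw [List.mem_range] at hj
    by_cases hje : pos x = j
    · subst hje
      rw [List.filter_cons_of_pos (by simp)]
      simp only [List.foldl_cons]
      congr 1
      rw [List.getD_eq_getElem?_getD, List.getElem?_eq_getElem (by rwa [List.length_set])]
      rw [List.getElem_set_self]
      rw [List.getD_eq_getElem?_getD, List.getElem?_eq_getElem hx]
      simp
    · rw [List.filter_cons_of_neg (by simpa using hje)]
      congr 1
      rw [List.getD_eq_getElem?_getD, List.getElem?_eq_getElem (by rwa [List.length_set])]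
      rw [List.getElem_set_ne (by omega)]
      simp [List.getD_eq_getElem?_getD, List.getElem?_eq_getElem hj]

theorem sorted2_fst_pairwise (xs : List (Int × Int)) :
    (PySem.List.sorted2 xs (·.1) (·.2)).Pairwise (fun a b => a.1 ≤ b.1) := by
  have h : PySem.List.sorted2 xs (·.1) (·.2)
      = PySem.List.sorted xs (fun a => toLex (a.1, a.2)) := by
    rw [PySem.List.sorted_eq_foldl_insertBy]
    show List.foldl (fun acc x => PySem.List.insertBy
        (fun a b => decide (a.1 < b.1) || (!decide (b.1 < a.1) && decide (a.2 < b.2))) x acc) [] xs = _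
    congr 1
    funext acc x
    congr 1
    funext a b
    have : (toLex (a.1, a.2) < toLex (b.1, b.2)) ↔ (a.1 < b.1 ∨ a.1 = b.1 ∧ a.2 < b.2) := Prod.Lex.lt_iff
    by_cases h1 : a.1 < b.1 <;> by_cases h2 : b.1 < a.1 <;> by_cases h3 : a.2 < b.2 <;>
      simp [this, h1, h2, h3] <;> omega
  rw [h]
  have hp := PySem.List.sorted_pairwise xs (fun a => toLex (a.1, a.2))
  refine hp.imp ?_
  intro a b hab
  rcases Prod.Lex.le_iff.mp hab with h | ⟨h1, _⟩
  · exact le_of_lt h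
  · exact le_of_eq h1

theorem master {α β : Type} (S : List Int) (n : Nat) (hn : S.length = n) (hn1 : 1 ≤ n)
    (hsort : (S.drop 1).Pairwise (· ≤ ·))
    (key : α → Int) (upd : β → Nat → α → β) (e : β)
    (xs : List α) (hxs : xs.Pairwise (fun a b => key a ≤ key b)) :
    (xs.foldl (fun st x => (pvAdvance S st.1 (key x),
        st.2.set (S.length - 1 - pvAdvance S st.1 (key x))
          (upd (st.2.getD (S.length - 1 - pvAdvance S st.1 (key x)) e) (pvAdvance S st.1 (key x)) x)))
      (0, List.replicate n e)).2
    = (List.range n).map (fun k =>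
        (xs.filter (fun x => pvLocate S (key x) == S.length - 1 - k)).foldl
          (fun b x => upd b (S.length - 1 - k) x) e) := by
  have hdl : (S.drop 1).length = n - 1 := by rw [List.length_drop, hn]
  set L : Int → Nat := fun i => (S.drop 1).countP (fun s => decide (s ≤ i)) with hL
  have hLle : ∀ i, L i ≤ n - 1 := by
    intro i
    show (S.drop 1).countP (fun s => decide (s ≤ i)) ≤ n - 1
    have := List.countP_le_length (l := S.drop 1) (p := fun s => decide (s ≤ i))
    omega
  have hadv : ∀ (f : Nat) (i : Int), f ≤ L i → pvAdvance S f i = L i :=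
    fun f i hf => pvAdvance_eq S hsort i f hf
  have hmono : ∀ i j : Int, i ≤ j → L i ≤ L j := by
    intro i j hij
    exact List.countP_mono_left (fun x _ hx => by
      simp only [decide_eq_true_eq] at hx ⊢; omega)
  rw [sweep_eq S L hadv hmono key
      (fun s f x => s.set (S.length - 1 - f) (upd (s.getD (S.length - 1 - f) e) f x))
      xs hxs 0 (fun x _ => Nat.zero_le _) (List.replicate n e)]
  rw [bucket_eq (fun x => S.length - 1 - L (key x)) (fun b x => upd b (L (key x)) x) e xs
      (List.replicate n e) (fun x _ => by
        show S.length - 1 - L (key x) < (List.replicate n e).length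
        rw [List.length_replicate]; have := hLle (key x); omega)]
  rw [List.length_replicate]
  apply List.map_congr_left
  intro k hk
  rw [List.mem_range] at hk
  have hget : (List.replicate n e).getD k e = e := by
    rw [List.getD_eq_getElem?_getD, List.getElem?_replicate]
    split <;> simp
  rw [hget]
  rw [List.filter_congr (fun x _ => by
    show (decide (S.length - 1 - L (key x) = k)) = (decide (pvLocate S (key x) = S.length - 1 - k))
    have h1 := hLle (key x)
    rw [pvLocate_eq_countP]
    have : ((S.drop 1).countP (fun s => decide (s ≤ key x))) = L (key x) := rfl
    rw [this]
    apply decide_eq_decide.mpr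
    omega)]
  apply PySem.List.foldl_congr_mem
  intro acc x hx
  rw [List.mem_filter] at hx
  have h2 : pvLocate S (key x) = S.length - 1 - k := by simpa using hx.2
  rw [pvLocate_eq_countP] at h2
  have h3 : L (key x) = S.length - 1 - k := h2
  rw [h3]

-- ===== VERDICT (by name: the statement is the Claim_ definition above) =====
theorem get_width_marginals_and_fixed_bits_py_spec : Claim_equal_get_width_marginals_and_fixed_bits_py := by
  intro info mi fb _ hpre
  unfold Spec_get_width_marginals_and_fixed_bits_py
  obtain ⟨hall, hempty⟩ := hpre
  by_cases hinfo : info = []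
  · subst hinfo
    obtain ⟨h1, h2⟩ := hempty rfl
    cases mi with
    | none =>
      cases fb with
      | none => decide
      | some fbl =>
        have hfb : fbl = [] := by simpa using h2
        subst hfb; decide
    | some l =>
      have hl : l = [] := by simpa using h1
      subst hl
      cases fb with
      | none => decide
      | some fbl =>
        have hfb : fbl = [] := by simpa using h2
        subst hfb; decide
  · simp only [get_width_marginals_and_fixed_bits_py, get_width_marginals_and_fixed_bits_py_alt]
    rw [sumsA_eq, sumsB_eq]
    set W := info.map (fun p => (PySem.Dict.mk p.2).getD "width" 0) with hWdef
    set R := W.reverse with hRdef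
    set S := pvSums 0 (R.drop 1) with hSdef
    have hWpos : ∀ w ∈ W, 0 ≤ w := by
      intro w hw
      rw [hWdef] at hw
      obtain ⟨p, hp, rfl⟩ := List.mem_map.mp hw
      have hq := List.all_eq_true.mp hall p hp
      cases hget : (PySem.Dict.mk p.2).get? "width" with
      | none => rw [hget] at hq; simp at hq
      | some v =>
        rw [hget] at hq
        simp only [Option.map_some, Option.getD_some, decide_eq_true_eq] at hq
        rw [PySem.Dict.getD_eq_get?_getD, hget]
        simpa using hq
    have hRpos : ∀ w ∈ R.drop 1, 0 ≤ w := fun w hw =>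
      hWpos w (List.mem_reverse.mp (List.mem_of_mem_drop hw))
    have hsortS : (S.drop 1).Pairwise (· ≤ ·) :=
      (pvSums_pairwise 0 (R.drop 1) hRpos).sublist (List.drop_sublist 1 _)
    have hn1 : 1 ≤ W.length := by
      rw [hWdef, List.length_map]
      cases info with
      | nil => exact absurd rfl hinfo
      | cons a t => simp
    have hnS : S.length = W.length := by
      rw [hSdef, pvSums_length, List.length_drop, hRdef, List.length_reverse]
      omega
    cases mi with
    | none =>
      cases fb with
      | none => rfl
      | some fbl =>
        dsimp only
        have Hf := master S W.length hnS hn1 hsortS (fun pr : Int × Int => pr.1)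
          (fun d f pr => d.insert
            (PySem.List.pyGetD R ((f : Nat) : Int) 0 - (pr.1 - PySem.List.pyGetD S ((f : Nat) : Int) 0) - 1) pr.2)
          PySem.Dict.empty (PySem.List.sorted2 fbl (·.1) (·.2)) (sorted2_fst_pairwise fbl)
        beta_reduce at Hf
        rw [Hf]
        simp only [PySem.List.pyGetD_natCast]
    | some mil =>
      dsimp only
      have hsmi : (PySem.List.sorted mil (fun x => x)).Pairwise (fun a b => (fun x : Int => x) a ≤ (fun x : Int => x) b) := by
        simpa using PySem.List.sorted_pairwise mil (fun x => x)
      have Hm := master S W.length hnS hn1 hsortS (fun i : Int => i)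
        (fun l f i => l ++ [PySem.List.pyGetD R ((f : Nat) : Int) 0 - (i - PySem.List.pyGetD S ((f : Nat) : Int) 0) - 1])
        ([] : List Int) (PySem.List.sorted mil (fun x => x)) hsmi
      beta_reduce at Hm
      rw [Hm]
      cases fb with
      | none =>
        dsimp only
        simp only [PySem.List.foldl_append_singleton_eq_map, List.nil_append, PySem.List.pyGetD_natCast]
      | some fbl =>
        dsimp only
        have Hf := master S W.length hnS hn1 hsortS (fun pr : Int × Int => pr.1)
          (fun d f pr => d.insert
            (PySem.List.pyGetD R ((f : Nat) : Int) 0 - (pr.1 - PySem.List.pyGetD S ((f : Nat) : Int) 0) - 1) pr.2)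
          PySem.Dict.empty (PySem.List.sorted2 fbl (·.1) (·.2)) (sorted2_fst_pairwise fbl)
        beta_reduce at Hf
        rw [Hf]
        simp only [PySem.List.foldl_append_singleton_eq_map, List.nil_append, PySem.List.pyGetD_natCast]
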